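-- pv_equiv track=rewrite | github.com/C-KAII/intelligent-systems | path-finding/src/help_the_robot.py | path_found_hcs
-- ===== SOURCE A (Python) =====
-- def path_found_hcs(best_sequence, start_point, goal_point):
--     """
--     Function specific for HCS solution, to construct the path to reach the goal point
--     Returns the solution path that the algorithm found
--     """
--     # Initialise the current position and solution path
--     current_position = start_point
--     solution_path = [current_position]
--
--     # Loop through sequence
--     for move in best_sequence:
--         # Find next position
--         next_position = (
--             current_position[0] + move[0], current_position[1] + move[1])
--
--         # Check if goal reached
--         if next_position == goal_point:
--             solution_path.append(next_position)
--             break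
--
--         # Else, append to path, set next pos and continue looping
--         else:
--             solution_path.append(next_position)
--             current_position = next_position
--
--     # Return the solution path
--     return solution_path
-- ===== SOURCE B (Python) =====
-- def path_found_hcs(best_sequence, start_point, goal_point):
--     # Phase 1: precompute the full cumulative trajectory (start included).
--     full = [start_point]
--     for dx, dy in best_sequence:
--         x, y = full[-1]
--         full.append((x + dx, y + dy))
--     # Phase 2: truncate at the first occurrence of the goal after the start.
--     tail = full[1:]
--     if goal_point in tail:
--         return full[:tail.index(goal_point) + 2]
--     return full
-- ===== Notes on version B (the rewrite author's own statement) =====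
-- stated objective: alternative
-- what changed: B splits A's single early-break loop into two phases: it precomputes the full cumulative trajectory, then truncates it at the first occurrence of the goal after the start.
import Mathlib
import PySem

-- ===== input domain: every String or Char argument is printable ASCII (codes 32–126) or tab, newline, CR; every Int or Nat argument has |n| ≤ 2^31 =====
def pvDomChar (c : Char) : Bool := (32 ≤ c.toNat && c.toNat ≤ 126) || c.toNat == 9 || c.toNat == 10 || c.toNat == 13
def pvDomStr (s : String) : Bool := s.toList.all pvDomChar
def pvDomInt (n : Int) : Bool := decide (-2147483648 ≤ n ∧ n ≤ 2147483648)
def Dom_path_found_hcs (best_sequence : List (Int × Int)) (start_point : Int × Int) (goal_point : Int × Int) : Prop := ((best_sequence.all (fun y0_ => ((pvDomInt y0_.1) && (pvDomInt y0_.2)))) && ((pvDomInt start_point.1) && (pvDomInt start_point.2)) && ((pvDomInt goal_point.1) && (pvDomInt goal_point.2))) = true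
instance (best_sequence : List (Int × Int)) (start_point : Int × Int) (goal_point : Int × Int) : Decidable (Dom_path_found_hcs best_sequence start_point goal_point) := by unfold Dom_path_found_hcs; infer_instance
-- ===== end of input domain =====

-- ===== PORT A =====
-- A: one loop carrying current_position, appending each next position and breaking
-- the first time it equals the goal; the start element is emitted unconditionally.
def pathLoopA (best_sequence : List (Int × Int)) (current : Int × Int) (goal : Int × Int) : List (Int × Int) :=
  match best_sequence with
  | [] => []
  | move :: rest =>
    let next : Int × Int := (current.1 + move.1, current.2 + move.2)
    if next = goal then [next]
    else next :: pathLoopA rest next goal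

def path_found_hcs (best_sequence : List (Int × Int)) (start_point : Int × Int) (goal_point : Int × Int) : List (Int × Int) :=
  start_point :: pathLoopA best_sequence start_point goal_point

-- ===== PORT B =====
-- B phase 1: the full cumulative trajectory (start included), no goal test.
def fullTrajB (start : Int × Int) (moves : List (Int × Int)) : List (Int × Int) :=
  match moves with
  | [] => [start]
  | m :: ms => start :: fullTrajB (start.1 + m.1, start.2 + m.2) ms

-- B phase 2: truncate at the first occurrence of the goal after the start.
def path_found_hcs_alt (best_sequence : List (Int × Int)) (start_point : Int × Int) (goal_point : Int × Int) : List (Int × Int) :=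
  let full := fullTrajB start_point best_sequence
  let tail := PySem.List.slice full (some 1) none
  if goal_point ∈ tail then
    match PySem.List.index? tail goal_point with
    | some i => full.take (i + 2)
    | none => full
  else full

-- ===== PRECONDITION & SPEC =====
def Spec_path_found_hcs (best_sequence : List (Int × Int)) (start_point : Int × Int) (goal_point : Int × Int) (out : List (Int × Int)) : Prop := out = path_found_hcs_alt best_sequence start_point goal_point
instance (best_sequence : List (Int × Int)) (start_point : Int × Int) (goal_point : Int × Int) (out : List (Int × Int)) : Decidable (Spec_path_found_hcs best_sequence start_point goal_point out) := by unfold Spec_path_found_hcs; infer_instance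

-- ===== CLAIM (what is proved, stated in full; the proofs are below) =====
def Claim_equal_path_found_hcs : Prop := ∀ (best_sequence : List (Int × Int)) (start_point : Int × Int) (goal_point : Int × Int), Dom_path_found_hcs best_sequence start_point goal_point → Spec_path_found_hcs best_sequence start_point goal_point (path_found_hcs best_sequence start_point goal_point)

-- ===== LEMMAS AND PROOFS =====
-- Proof helper: the trajectory after the start point.
def tailTraj (s : Int × Int) (moves : List (Int × Int)) : List (Int × Int) :=
  match moves with
  | [] => []
  | m :: ms => ((s.1 + m.1, s.2 + m.2)) :: tailTraj (s.1 + m.1, s.2 + m.2) ms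

theorem fullTrajB_eq (s : Int × Int) (ms : List (Int × Int)) :
    fullTrajB s ms = s :: tailTraj s ms := by
  induction ms generalizing s with
  | nil => rfl
  | cons m ms ih => simp [fullTrajB, tailTraj, ih]

-- A's loop equals B's truncation of the trajectory tail.
theorem pathLoopA_eq_trunc (seq : List (Int × Int)) (s g : Int × Int) :
    pathLoopA seq s g =
      (let t := tailTraj s seq
       if g ∈ t then
         match PySem.List.index? t g with
         | some i => t.take (i + 1)
         | none => t
       else t) := by
  induction seq generalizing s with
  | nil => simp [pathLoopA, tailTraj]
  | cons m ms ih =>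
    simp only [pathLoopA, tailTraj]
    set n : Int × Int := (s.1 + m.1, s.2 + m.2) with hn
    by_cases h : n = g
    · subst h
      simp [PySem.List.index?_eq_idxOf?, List.idxOf?_cons]
    · rw [if_neg h, ih n]
      by_cases hm : g ∈ tailTraj n ms
      · have hs : (PySem.List.index? (tailTraj n ms) g).isSome := by simp [hm]
        obtain ⟨i, hi⟩ := Option.isSome_iff_exists.mp hs
        simp only [PySem.List.index?_eq_idxOf?] at hi
        simp [PySem.List.index?_eq_idxOf?, List.idxOf?_cons, h, hm, hi,
          List.take_succ_cons, Ne.symm h]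
      · simp [hm, Ne.symm h]

-- ===== VERDICT (by name: the statement is the Claim_ definition above) =====
theorem path_found_hcs_spec : Claim_equal_path_found_hcs := by
  intro seq s g _
  unfold Spec_path_found_hcs path_found_hcs path_found_hcs_alt
  rw [pathLoopA_eq_trunc]
  simp only [fullTrajB_eq, PySem.List.slice_from_one, List.tail_cons]
  by_cases hm : g ∈ tailTraj s seq
  · simp [hm, List.take_succ_cons]
    rcases hcase : List.idxOf? g (tailTraj s seq) with _ | i <;> simp [hcase]
  · simp [hm]
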